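-- pv_equiv track=rewrite | github.com/NatnaelTigistu/A2SV_Solved_Questions | minimum_index_Sum.py | findRestaurant
-- ===== SOURCE A (Python) =====
-- from typing import List
--
-- def findRestaurant(list1: List[str], list2: List[str]) -> List[str]:
--     index_map = {s: i for i, s in enumerate(list1)}
--     min_sum = float("inf")
--     result = []
--
--     for j, s in enumerate(list2):
--         if s in index_map:
--             total = index_map[s] + j
--             if total < min_sum:
--                 min_sum = total
--                 result = [s]
--             elif total == min_sum:
--                 result.append(s)
--
--     return result
-- ===== SOURCE B (Python) =====
-- def findRestaurant(list1, list2):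
--     index_map = {s: i for i, s in enumerate(list1)}
--     cands = sorted(((index_map[s] + j, s) for j, s in enumerate(list2) if s in index_map),
--                    key=lambda c: c[0])
--     out = []
--     for t, s in cands:
--         if t != cands[0][0]:
--             break
--         out.append(s)
--     return out
-- ===== Notes on version B (the rewrite author's own statement) =====
-- stated objective: alternative
-- what changed: Replaces A's single-pass running-minimum loop (incrementally rebuilding the result) by a stable sort of the (index-sum, name) candidate pairs by sum followed by taking the leading equal-sum group; the stable sort preserves list2 order within ties, so the leading group equals A's result.
import Mathlib
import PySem

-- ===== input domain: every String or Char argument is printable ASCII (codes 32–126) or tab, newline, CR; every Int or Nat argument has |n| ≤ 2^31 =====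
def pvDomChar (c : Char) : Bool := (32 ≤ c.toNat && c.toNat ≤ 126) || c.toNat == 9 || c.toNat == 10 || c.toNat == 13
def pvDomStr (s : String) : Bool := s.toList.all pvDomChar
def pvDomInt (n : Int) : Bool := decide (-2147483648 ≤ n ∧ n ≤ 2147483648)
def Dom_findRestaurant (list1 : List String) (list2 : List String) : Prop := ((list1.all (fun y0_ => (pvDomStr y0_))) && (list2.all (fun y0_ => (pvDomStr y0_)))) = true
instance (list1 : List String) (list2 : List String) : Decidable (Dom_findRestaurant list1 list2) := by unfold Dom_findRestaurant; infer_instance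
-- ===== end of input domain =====

-- B replaces A's single-pass running-minimum loop by a stable sort of the (sum, name) candidates
-- followed by taking the leading equal-sum group (alternative decomposition: sort-then-scan, same result).

-- ===== PORT A =====
-- index_map = {s: i for i, s in enumerate(list1)}  (shared first line of both Pythons)
def pvIndexMap (list1 : List String) : PySem.Dict String Int :=
  (PySem.List.enumerate list1 0).foldl (fun d p => d.insert p.2 p.1) PySem.Dict.empty

-- the for-loop of A: state (min_sum as Option Int — none = float("inf"), result)
def pvAGo (m : PySem.Dict String Int) : List String → Int → Option Int × List String → Option Int × List String
  | [], _, st => st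
  | s :: rest, j, (ms, res) =>
    match m.get? s with
    | none => pvAGo m rest (j + 1) (ms, res)
    | some i =>
      let total := i + j
      match ms with
      | none => pvAGo m rest (j + 1) (some total, [s])
      | some v =>
        if total < v then pvAGo m rest (j + 1) (some total, [s])
        else if total = v then pvAGo m rest (j + 1) (some v, res ++ [s])
        else pvAGo m rest (j + 1) (some v, res)

def findRestaurant (list1 : List String) (list2 : List String) : List String :=
  (pvAGo (pvIndexMap list1) list2 0 (none, [])).2

-- ===== PORT B =====
-- the generator (index_map[s] + j, s) for j, s in enumerate(list2) if s in index_map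
def pvBCands (m : PySem.Dict String Int) : List String → Int → List (Int × String)
  | [], _ => []
  | s :: rest, j =>
    match m.get? s with
    | some i => (i + j, s) :: pvBCands m rest (j + 1)
    | none => pvBCands m rest (j + 1)

-- the for-loop of B: append while t == cands[0][0], break at the first other sum
def pvBLoop (best : Int) : List (Int × String) → List String
  | [] => []
  | (t, s) :: rest => if t ≠ best then [] else s :: pvBLoop best rest

def findRestaurant_alt (list1 : List String) (list2 : List String) : List String :=
  match PySem.List.sorted (pvBCands (pvIndexMap list1) list2 0) (fun c => c.1) false with
  | [] => []                                   -- the loop body never runs; cands[0] is never read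
  | (t0, s0) :: tail => pvBLoop t0 ((t0, s0) :: tail)

-- ===== PRECONDITION & SPEC =====
def Spec_findRestaurant (list1 : List String) (list2 : List String) (out : List String) : Prop := out = findRestaurant_alt list1 list2
instance (list1 : List String) (list2 : List String) (out : List String) : Decidable (Spec_findRestaurant list1 list2 out) := by unfold Spec_findRestaurant; infer_instance

-- ===== CLAIM (what is proved, stated in full; the proofs are below) =====
def Claim_equal_findRestaurant : Prop := ∀ (list1 : List String) (list2 : List String), Dom_findRestaurant list1 list2 → Spec_findRestaurant list1 list2 (findRestaurant list1 list2)

-- ===== LEMMAS AND PROOFS =====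

-- abbreviations used ONLY by the proofs
def pvIns (x : Int × String) (acc : List (Int × String)) : List (Int × String) :=
  PySem.List.insertBy (fun a b => decide (a.1 < b.1)) x acc

def pvHG : List (Int × String) → List String
  | [] => []
  | c :: rest => pvBLoop c.1 (c :: rest)

theorem pvBLoop_cons_eq (t : Int) (s : String) (l : List (Int × String)) :
    pvBLoop t ((t, s) :: l) = s :: pvBLoop t l := by
  simp [pvBLoop]

theorem pv_ins_lt (x : Int × String) (c : Int × String) (l : List (Int × String))
    (h : x.1 < c.1) : pvIns x (c :: l) = x :: c :: l := by
  simp [pvIns, PySem.List.insertBy, h]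

theorem pv_ins_ge (x : Int × String) (c : Int × String) (l : List (Int × String))
    (h : ¬ x.1 < c.1) : pvIns x (c :: l) = c :: pvIns x l := by
  simp [pvIns, PySem.List.insertBy, h]

-- inserting an element with key = t into a list whose keys are all ≥ t appends it to the t-group
theorem pv_grp_ins_eq (x : Int × String) :
    ∀ (acc : List (Int × String)), (∀ y ∈ acc, x.1 ≤ y.1) →
      pvBLoop x.1 (pvIns x acc) = pvBLoop x.1 acc ++ [x.2] := by
  intro acc
  induction acc with
  | nil => intro _; simp [pvIns, PySem.List.insertBy, pvBLoop]
  | cons c l ih =>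
    intro h
    by_cases hlt : x.1 < c.1
    · rw [pv_ins_lt x c l hlt]
      obtain ⟨t, s⟩ := x
      rw [pvBLoop_cons_eq]
      have hne : c.1 ≠ t := by have := h c (by simp); simp at *; omega
      simp [pvBLoop, hne]
    · have hge := h c (by simp)
      have hceq : c.1 = x.1 := le_antisymm (by omega) hge
      rw [pv_ins_ge x c l hlt]
      obtain ⟨u, s0⟩ := c
      simp only at hceq
      subst hceq
      rw [pvBLoop_cons_eq, pvBLoop_cons_eq, ih (fun y hy => h y (by simp [hy]))]
      simp

-- inserting an element with key > t leaves the t-group unchanged (keys of acc all ≥ t)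
theorem pv_grp_ins_gt (x : Int × String) (t : Int) (hx : t < x.1) :
    ∀ (acc : List (Int × String)), (∀ y ∈ acc, t ≤ y.1) →
      pvBLoop t (pvIns x acc) = pvBLoop t acc := by
  intro acc
  induction acc with
  | nil =>
    intro _
    have : x.1 ≠ t := by omega
    simp [pvIns, PySem.List.insertBy, pvBLoop, this]
  | cons c l ih =>
    intro h
    by_cases hlt : x.1 < c.1
    · rw [pv_ins_lt x c l hlt]
      have hxne : x.1 ≠ t := by omega
      have hcne : c.1 ≠ t := by omega
      obtain ⟨a, b⟩ := x; obtain ⟨u, s0⟩ := c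
      simp only at hxne hcne
      simp [pvBLoop, hxne, hcne]
    · rw [pv_ins_ge x c l hlt]
      obtain ⟨u, s0⟩ := c
      by_cases hce : u = t
      · subst hce
        rw [pvBLoop_cons_eq, pvBLoop_cons_eq, ih (fun y hy => h y (by simp [hy]))]
      · simp [pvBLoop, hce]

theorem pv_mem_ins (x y : Int × String) (acc : List (Int × String)) :
    y ∈ pvIns x acc → y = x ∨ y ∈ acc :=
  (PySem.List.mem_insertBy _ x y acc).mp

-- main invariant: A's loop, once min_sum = v is finite with result = the v-group of acc,
-- computes the head-group of folding the remaining candidates into acc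
theorem pv_main_some (m : PySem.Dict String Int) :
    ∀ (l : List String) (j : Int) (v : Int) (s0 : String) (r : List (Int × String)),
      (∀ y ∈ (v, s0) :: r, v ≤ y.1) →
      (pvAGo m l j (some v, pvBLoop v ((v, s0) :: r))).2 =
        pvHG ((pvBCands m l j).foldl (fun a x => pvIns x a) ((v, s0) :: r)) := by
  intro l
  induction l with
  | nil => intro j v s0 r _; simp [pvAGo, pvBCands, pvHG]
  | cons s rest ih =>
    intro j v s0 r h
    cases hm : m.get? s with
    | none => simp only [pvAGo, hm, pvBCands]; exact ih (j + 1) v s0 r h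
    | some i =>
      simp only [pvAGo, hm, pvBCands, List.foldl_cons]
      by_cases h1 : i + j < v
      · rw [if_pos h1]
        have hins : pvIns (i + j, s) ((v, s0) :: r) = (i + j, s) :: (v, s0) :: r :=
          pv_ins_lt _ _ _ h1
        rw [hins]
        have h' : ∀ y ∈ (i + j, s) :: (v, s0) :: r, i + j ≤ y.1 := by
          intro y hy
          simp only [List.mem_cons] at hy
          rcases hy with hy | hy | hy
          · subst hy; simp
          · subst hy; simp; omega
          · have := h y (by simp [hy]); omega
        have := ih (j + 1) (i + j) s ((v, s0) :: r) h'
        rw [← this]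
        have hvne : v ≠ i + j := by omega
        have : pvBLoop (i + j) ((i + j, s) :: (v, s0) :: r) = [s] := by
          simp [pvBLoop, hvne]
        rw [← this]
      · by_cases h2 : i + j = v
        · rw [if_neg h1, if_pos h2]
          have hge : ¬ (i + j : Int) < v := h1
          have hins : pvIns (i + j, s) ((v, s0) :: r) = (v, s0) :: pvIns (i + j, s) r :=
            pv_ins_ge _ _ _ hge
          have hgrp : pvBLoop v (pvIns (i + j, s) ((v, s0) :: r)) =
              pvBLoop v ((v, s0) :: r) ++ [s] := by
            have := pv_grp_ins_eq (x := (i + j, s)) ((v, s0) :: r) (by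
              intro y hy; have := h y hy; simp only; omega)
            simpa [h2] using this
          have h' : ∀ y ∈ (v, s0) :: pvIns (i + j, s) r, v ≤ y.1 := by
            intro y hy
            simp only [List.mem_cons] at hy
            rcases hy with hy | hy
            · subst hy; simp
            · rcases pv_mem_ins _ _ _ hy with hy' | hy'
              · subst hy'; simp; omega
              · exact h y (by simp [hy'])
          have := ih (j + 1) v s0 (pvIns (i + j, s) r) h'
          rw [← hins, hgrp] at this
          exact this
        · rw [if_neg h1, if_neg h2]
          have hgt : v < i + j := by omega
          have hge : ¬ (i + j : Int) < v := h1
          have hins : pvIns (i + j, s) ((v, s0) :: r) = (v, s0) :: pvIns (i + j, s) r :=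
            pv_ins_ge _ _ _ hge
          have hgrp : pvBLoop v (pvIns (i + j, s) ((v, s0) :: r)) = pvBLoop v ((v, s0) :: r) :=
            pv_grp_ins_gt (i + j, s) v hgt ((v, s0) :: r) h
          have h' : ∀ y ∈ (v, s0) :: pvIns (i + j, s) r, v ≤ y.1 := by
            intro y hy
            simp only [List.mem_cons] at hy
            rcases hy with hy | hy
            · subst hy; simp
            · rcases pv_mem_ins _ _ _ hy with hy' | hy'
              · subst hy'; simp; omega
              · exact h y (by simp [hy'])
          have := ih (j + 1) v s0 (pvIns (i + j, s) r) h'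
          rw [← hins, hgrp] at this
          exact this

theorem pv_main_none (m : PySem.Dict String Int) :
    ∀ (l : List String) (j : Int),
      (pvAGo m l j (none, [])).2 = pvHG ((pvBCands m l j).foldl (fun a x => pvIns x a) []) := by
  intro l
  induction l with
  | nil => intro j; simp [pvAGo, pvBCands, pvHG]
  | cons s rest ih =>
    intro j
    cases hm : m.get? s with
    | none => simp only [pvAGo, hm, pvBCands]; exact ih (j + 1)
    | some i =>
      simp only [pvAGo, hm, pvBCands, List.foldl_cons]
      have hins : pvIns (i + j, s) [] = [(i + j, s)] := by
        simp [pvIns, PySem.List.insertBy]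
      rw [hins]
      have hgrp : pvBLoop (i + j) ((i + j, s) :: ([] : List (Int × String))) = [s] := by
        simp [pvBLoop]
      have := pv_main_some m rest (j + 1) (i + j) s [] (by intro y hy; simp at hy; simp [hy])
      rw [hgrp] at this
      exact this

-- ===== VERDICT (by name: the statement is the Claim_ definition above) =====
theorem findRestaurant_spec : Claim_equal_findRestaurant := by
  intro list1 list2 _
  unfold Spec_findRestaurant findRestaurant findRestaurant_alt
  rw [pv_main_none]
  have key : pvHG (PySem.List.sorted (pvBCands (pvIndexMap list1) list2 0) (fun c => c.1) false) =
      pvHG ((pvBCands (pvIndexMap list1) list2 0).foldl (fun a x => pvIns x a) []) := by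
    rw [PySem.List.sorted_eq_foldl_insertBy]
    rfl
  rw [← key]
  cases PySem.List.sorted (pvBCands (pvIndexMap list1) list2 0) (fun c => c.1) false with
  | nil => simp [pvHG]
  | cons c t => obtain ⟨t0, s0⟩ := c; simp [pvHG]
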